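-- pv_equiv track=rewrite | github.com/jatinyyadav/se_dsl | assgn4.py | subtract_sparse_matrices
-- ===== SOURCE A (Python) =====
-- def subtract_sparse_matrices(matrix1, matrix2, rows, cols):
--     result = {}
--
--     # Subtract elements of the second matrix from the first matrix
--     for row, col, value in matrix1:
--         if (row, col) in result:
--             result[(row, col)] += value
--         else:
--             result[(row, col)] = value
--
--     for row, col, value in matrix2:
--         if (row, col) in result:
--             result[(row, col)] -= value
--         else:
--             result[(row, col)] = -value
--
--     # Convert result to sparse matrix format (excluding zero values)
--     return [(row, col, value) for (row, col), value in result.items() if value != 0]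
-- ===== SOURCE B (Python) =====
-- def subtract_sparse_matrices(matrix1, matrix2, rows, cols):
--     # Index each matrix independently, then combine in one merge pass.
--     d1 = {}
--     for r, c, v in matrix1:
--         d1[(r, c)] = d1.get((r, c), 0) + v
--     d2 = {}
--     for r, c, v in matrix2:
--         d2[(r, c)] = d2.get((r, c), 0) + v
--     out = []
--     for (r, c), v in d1.items():
--         w = v - d2.get((r, c), 0)
--         if w != 0:
--             out.append((r, c, w))
--     for (r, c), v in d2.items():
--         if (r, c) not in d1 and v != 0:
--             out.append((r, c, -v))
--     return out
-- ===== Notes on version B (the rewrite author's own statement) =====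
-- stated objective: alternative
-- what changed: A accumulates both matrices into one shared dict (adding then subtracting in place); B builds two independent per-matrix sum indexes and emits the result in a separate merge pass (d1's keys in order, then d2-only keys), filtering zeros as it goes.
import Mathlib
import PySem

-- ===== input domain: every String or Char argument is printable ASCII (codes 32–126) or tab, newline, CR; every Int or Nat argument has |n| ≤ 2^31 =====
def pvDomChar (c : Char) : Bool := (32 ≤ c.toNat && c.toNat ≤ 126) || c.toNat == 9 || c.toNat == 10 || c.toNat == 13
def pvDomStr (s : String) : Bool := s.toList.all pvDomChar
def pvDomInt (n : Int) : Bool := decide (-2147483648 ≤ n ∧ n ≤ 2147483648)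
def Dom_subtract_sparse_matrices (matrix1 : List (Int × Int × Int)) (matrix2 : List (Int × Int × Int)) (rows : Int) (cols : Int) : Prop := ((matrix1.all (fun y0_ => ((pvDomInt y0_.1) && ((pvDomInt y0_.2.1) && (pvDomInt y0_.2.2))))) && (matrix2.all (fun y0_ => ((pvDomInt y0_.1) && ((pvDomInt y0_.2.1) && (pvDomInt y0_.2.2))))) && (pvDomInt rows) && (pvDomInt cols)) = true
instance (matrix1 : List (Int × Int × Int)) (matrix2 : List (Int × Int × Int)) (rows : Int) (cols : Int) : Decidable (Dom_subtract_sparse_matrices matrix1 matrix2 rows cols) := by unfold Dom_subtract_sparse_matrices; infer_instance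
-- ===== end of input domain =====

-- B replaces A's single shared accumulate-then-subtract dict by two independent per-matrix sum indexes combined in a separate merge pass (same output order and zero-filtering).


-- ===== PORT A =====
def subtract_sparse_matrices (matrix1 : List (Int × Int × Int)) (matrix2 : List (Int × Int × Int)) (rows : Int) (cols : Int) : List (Int × Int × Int) :=
  let result : PySem.Dict (Int × Int) Int :=
    matrix1.foldl (fun result p =>
      if result.contains (p.1, p.2.1) then
        result.insert (p.1, p.2.1) (result.getD (p.1, p.2.1) 0 + p.2.2)
      else
        result.insert (p.1, p.2.1) p.2.2) PySem.Dict.empty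
  let result :=
    matrix2.foldl (fun result p =>
      if result.contains (p.1, p.2.1) then
        result.insert (p.1, p.2.1) (result.getD (p.1, p.2.1) 0 - p.2.2)
      else
        result.insert (p.1, p.2.1) (-p.2.2)) result
  (result.items.filter (fun q => q.2 != 0)).map (fun q => (q.1.1, q.1.2, q.2))


-- ===== PORT B =====
def subtract_sparse_matrices_alt (matrix1 : List (Int × Int × Int)) (matrix2 : List (Int × Int × Int)) (rows : Int) (cols : Int) : List (Int × Int × Int) :=
  let d1 : PySem.Dict (Int × Int) Int :=
    matrix1.foldl (fun d p => d.insert (p.1, p.2.1) (d.getD (p.1, p.2.1) 0 + p.2.2)) PySem.Dict.empty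
  let d2 : PySem.Dict (Int × Int) Int :=
    matrix2.foldl (fun d p => d.insert (p.1, p.2.1) (d.getD (p.1, p.2.1) 0 + p.2.2)) PySem.Dict.empty
  let out :=
    d1.items.foldl (fun out q =>
      let w := q.2 - d2.getD q.1 0
      if w != 0 then out ++ [(q.1.1, q.1.2, w)] else out) []
  d2.items.foldl (fun out q =>
    if !d1.contains q.1 && q.2 != 0 then out ++ [(q.1.1, q.1.2, -q.2)] else out) out


-- ===== PRECONDITION & SPEC =====
def Spec_subtract_sparse_matrices (matrix1 : List (Int × Int × Int)) (matrix2 : List (Int × Int × Int)) (rows : Int) (cols : Int) (out : List (Int × Int × Int)) : Prop := out = subtract_sparse_matrices_alt matrix1 matrix2 rows cols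
instance (matrix1 : List (Int × Int × Int)) (matrix2 : List (Int × Int × Int)) (rows : Int) (cols : Int) (out : List (Int × Int × Int)) : Decidable (Spec_subtract_sparse_matrices matrix1 matrix2 rows cols out) := by unfold Spec_subtract_sparse_matrices; infer_instance

-- ===== CLAIM (what is proved, stated in full; the proofs are below) =====
def Claim_equal_subtract_sparse_matrices : Prop := ∀ (matrix1 : List (Int × Int × Int)) (matrix2 : List (Int × Int × Int)) (rows : Int) (cols : Int), Dom_subtract_sparse_matrices matrix1 matrix2 rows cols → Spec_subtract_sparse_matrices matrix1 matrix2 rows cols (subtract_sparse_matrices matrix1 matrix2 rows cols)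

-- ===== LEMMAS AND PROOFS =====
-- A total key/value view of a triple
def pvKey (p : Int × Int × Int) : Int × Int := (p.1, p.2.1)

-- sum of the values a matrix contributes at a key
def pvSum (l : List (Int × Int × Int)) (k : Int × Int) : Int :=
  ((l.filter (fun p => pvKey p == k)).map (fun p => p.2.2)).sum

-- the final value of a cell in the difference
def pvVal (m1 m2 : List (Int × Int × Int)) (k : Int × Int) : Int := pvSum m1 k - pvSum m2 k

-- A's first loop body is the unconditional accumulate-insert
lemma stepA1_eq (d : PySem.Dict (Int × Int) Int) (p : Int × Int × Int) :
    (if d.contains (p.1, p.2.1) then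
        d.insert (p.1, p.2.1) (d.getD (p.1, p.2.1) 0 + p.2.2)
      else d.insert (p.1, p.2.1) p.2.2)
    = d.insert (pvKey p) (d.getD (pvKey p) 0 + p.2.2) := by
  by_cases h : d.contains (p.1, p.2.1)
  · simp [pvKey, h]
  · simp only [pvKey, if_neg h]
    rw [PySem.Dict.getD_of_not_contains _ _ (by simpa using h), zero_add]

-- A's second loop body is the accumulate-insert of the negated value
lemma stepA2_eq (d : PySem.Dict (Int × Int) Int) (p : Int × Int × Int) :
    (if d.contains (p.1, p.2.1) then
        d.insert (p.1, p.2.1) (d.getD (p.1, p.2.1) 0 - p.2.2)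
      else d.insert (p.1, p.2.1) (-p.2.2))
    = d.insert (pvKey p) (d.getD (pvKey p) 0 + (-p.2.2)) := by
  by_cases h : d.contains (p.1, p.2.1)
  · simp [pvKey, h, sub_eq_add_neg]
  · simp only [pvKey, if_neg h]
    rw [PySem.Dict.getD_of_not_contains _ _ (by simpa using h), zero_add]

-- lookup after an accumulate-insert loop: old value plus the contributed sum
lemma getD_accFold (val : Int × Int × Int → Int) (l : List (Int × Int × Int))
    (d : PySem.Dict (Int × Int) Int) (k : Int × Int) :
    (l.foldl (fun d p => d.insert (pvKey p) (d.getD (pvKey p) 0 + val p)) d).getD k 0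
      = d.getD k 0 + ((l.filter (fun p => pvKey p == k)).map val).sum := by
  induction l generalizing d with
  | nil => simp
  | cons p l ih =>
    simp only [List.foldl_cons, ih, List.filter_cons]
    by_cases h : pvKey p = k
    · subst h; simp [PySem.Dict.getD_insert_self]; ring
    · simp [PySem.Dict.getD_insert_of_ne _ _ _ (Ne.symm h), h]

-- keys of an accumulate-insert loop from empty: the distinct keys in first-appearance order
lemma keys_accFold (val : Int × Int × Int → Int) (l : List (Int × Int × Int)) :
    (l.foldl (fun d p => d.insert (pvKey p) (d.getD (pvKey p) 0 + val p)) PySem.Dict.empty).keys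
      = PySem.Set.ofList (l.map pvKey) := by
  rw [PySem.Dict.keys_foldl_insert_key]
  simp [PySem.Set.update_nil_left]

lemma nodup_accFold (val : Int × Int × Int → Int) (l : List (Int × Int × Int))
    (d : PySem.Dict (Int × Int) Int) (h : d.keys.Nodup) :
    (l.foldl (fun d p => d.insert (pvKey p) (d.getD (pvKey p) 0 + val p)) d).keys.Nodup :=
  PySem.Dict.nodup_keys_foldl_insert_key l pvKey _ d h

lemma pvSum_eq_zero_of_not_mem (l : List (Int × Int × Int)) (k : Int × Int)
    (h : k ∉ l.map pvKey) : pvSum l k = 0 := by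
  unfold pvSum
  have : l.filter (fun p => pvKey p == k) = [] := by
    apply List.filter_eq_nil_iff.mpr
    intro p hp
    simp only [beq_iff_eq]
    exact fun hk => h (hk ▸ List.mem_map_of_mem hp)
  simp [this]



-- ===== VERDICT (by name: the statement is the Claim_ definition above) =====
theorem subtract_sparse_matrices_spec : Claim_equal_subtract_sparse_matrices := by
  intro m1 m2 rows cols _
  unfold Spec_subtract_sparse_matrices subtract_sparse_matrices subtract_sparse_matrices_alt
  simp only [stepA1_eq, stepA2_eq]
  simp only [show ∀ p : Int × Int × Int, ((p.1, p.2.1) : Int × Int) = pvKey p from fun _ => rfl]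
  set d1 := m1.foldl (fun d p => d.insert (pvKey p) (d.getD (pvKey p) 0 + p.2.2)) PySem.Dict.empty with hd1
  set d2 := m2.foldl (fun d p => d.insert (pvKey p) (d.getD (pvKey p) 0 + p.2.2)) PySem.Dict.empty with hd2
  set dA := m2.foldl (fun d p => d.insert (pvKey p) (d.getD (pvKey p) 0 + -p.2.2)) d1 with hdA
  have hnd1 : d1.keys.Nodup := nodup_accFold _ _ _ PySem.Dict.nodup_keys_empty
  have hnd2 : d2.keys.Nodup := nodup_accFold _ _ _ PySem.Dict.nodup_keys_empty
  have hndA : dA.keys.Nodup := nodup_accFold _ _ _ hnd1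
  have hk1 : d1.keys = PySem.Set.ofList (m1.map pvKey) := keys_accFold _ _
  have hk2 : d2.keys = PySem.Set.ofList (m2.map pvKey) := keys_accFold _ _
  have hgd1 : ∀ k, d1.getD k 0 = pvSum m1 k := by
    intro k; rw [hd1, getD_accFold]; simp [pvSum]
  have hgd2 : ∀ k, d2.getD k 0 = pvSum m2 k := by
    intro k; rw [hd2, getD_accFold]; simp [pvSum]
  have hsumneg : ∀ (l : List (Int × Int × Int)) k,
      ((l.filter (fun p => pvKey p == k)).map (fun p => -p.2.2)).sum = -pvSum l k := by
    intro l k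
    unfold pvSum
    induction (l.filter (fun p => pvKey p == k)) with
    | nil => simp
    | cons q t ih => simp [ih]; ring
  have hgdA : ∀ k, dA.getD k 0 = pvVal m1 m2 k := by
    intro k; rw [hdA, getD_accFold, hgd1, hsumneg, pvVal, sub_eq_add_neg]
  have hkA : dA.keys = d1.keys ++
      (PySem.Set.ofList (m2.map pvKey)).filter (fun y => !(PySem.Set.contains d1.keys y)) := by
    rw [hdA, PySem.Dict.keys_foldl_insert_key, PySem.Set.update_eq_append_filter]
  have hcontains : ∀ k, d1.contains k = PySem.Set.contains d1.keys k := by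
    intro k
    rw [PySem.Dict.contains_eq_decide_mem_keys]
    by_cases h : k ∈ d1.keys
    · simp [h]
    · simp only [h, decide_false]
      cases hc : PySem.Set.contains d1.keys k
      · rfl
      · exact absurd ((PySem.Set.contains_iff _ _).mp hc) h
  -- rewrite both sides into filter/map over key lists
  rw [PySem.Dict.items_eq_map_keys dA hndA 0, PySem.Dict.items_eq_map_keys d1 hnd1 0,
      PySem.Dict.items_eq_map_keys d2 hnd2 0]
  simp only [PySem.List.foldl_append_if, List.nil_append, List.filter_map, List.map_map,
    Function.comp_def, hgd1, hgd2, hgdA, hkA]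
  rw [List.filter_append, List.map_append]
  congr 1
  rw [hk2, List.filter_filter]
  have hnotmem : ∀ k : Int × Int, PySem.Set.contains d1.keys k = false → k ∉ m1.map pvKey := by
    intro k hc hm
    have : k ∈ d1.keys := by rw [hk1]; exact (PySem.Set.mem_ofList _ _).mpr hm
    rw [(PySem.Set.contains_iff _ _).mpr this] at hc
    exact absurd hc (by simp)
  have hpred : ∀ k : Int × Int,
      ((pvVal m1 m2 k != 0) && !(PySem.Set.contains d1.keys k))
        = ((!(d1.contains k)) && (pvSum m2 k != 0)) := by
    intro k
    rw [hcontains]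
    cases hc : PySem.Set.contains d1.keys k
    · have hz : pvVal m1 m2 k = -pvSum m2 k := by
        rw [pvVal, pvSum_eq_zero_of_not_mem _ _ (hnotmem k hc), zero_sub]
      by_cases h0 : pvSum m2 k = 0 <;>
        simp [hz, h0, bne, neg_eq_zero]
    · simp
  rw [List.filter_congr (fun k _ => hpred k)]
  apply List.map_congr_left
  intro k hkmem
  have hc := (List.mem_filter.mp hkmem).2
  have hc1 : PySem.Set.contains d1.keys k = false := by
    rw [← hcontains]
    rcases Bool.eq_false_or_eq_true (d1.contains k) with h | h
    · rw [h] at hc; simp at hc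
    · exact h
  have hz : pvVal m1 m2 k = -pvSum m2 k := by
    rw [pvVal, pvSum_eq_zero_of_not_mem _ _ (hnotmem k hc1), zero_sub]
  rw [hz]
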